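-- pv_equiv track=rewrite | github.com/ReactionMechanismGenerator/ARC | arc/species/converter.py | split_str_zmat
-- ===== SOURCE A (Python) =====
-- def split_str_zmat(zmat_str):
--     """
--     Split a string zmat into its coordinates and variables sections.
--
--     Args:
--         zmat_str (str): The zmat.
--
--     Returns:
--         Tuple[str: The coords section, str: The variables section if it exists, else None]
--     """
--     coords, variables = list(), list()
--     flag = False
--     if 'variables' in zmat_str.lower():
--         for line in zmat_str.splitlines():
--             if 'variables' in line.lower():
--                 flag = True
--                 continue
--             elif flag and line:
--                 variables.append(line)
--             elif line:
--                 coords.append(line)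
--     else:
--         splits = zmat_str.splitlines()
--         if len(splits[0].split()) == len(splits[1].split()) and \
--                 (len(splits[0].split()) == 2 or (len(splits[0].split()) == 1 and len(splits[1]) != 1)):
--             # this string starts with the variables section
--             for line in splits:
--                 if flag and line:
--                     coords.append(line)
--                 if not flag and len(line.split()) == len(splits[0].split()) and line:
--                     variables.append(line)
--                 else:
--                     flag = True
--         elif len(splits[-1].split()) == len(splits[-2].split()) and len(splits[-1].split()) in [1, 2]:
--             # this string starts with the coordinates section
--             for line in splits:
--                 if flag and len(line.split()) == len(splits[-1].split()) and line:
--                     variables.append(line)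
--                 if not flag and line:
--                     coords.append(line)
--                 else:
--                     flag = True
--     coords = '\n'.join(coords) if len(coords) else zmat_str
--     variables = '\n'.join(variables) if len(variables) else None
--     return coords, variables
-- ===== SOURCE B (Python) =====
-- def _cut(lines, stop, keep_pre, keep_post):
--     """Recursively split `lines` at the first line satisfying `stop` (that
--     line is dropped): returns (filtered lines before it, filtered lines after)."""
--     if not lines:
--         return [], []
--     head, tail = lines[0], lines[1:]
--     if stop(head):
--         return [], [l for l in tail if keep_post(l)]
--     pre, post = _cut(tail, stop, keep_pre, keep_post)
--     if keep_pre(head):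
--         pre.insert(0, head)
--     return pre, post
--
--
-- def split_str_zmat(zmat_str):
--     """Split a string zmat into its coordinates and variables sections.
--     One recursive higher-order splitter replaces A's three stateful flag loops."""
--     lines = zmat_str.splitlines()
--     if 'variables' in zmat_str.lower():
--         coords, variables = _cut(lines,
--                                  lambda l: 'variables' in l.lower(),
--                                  lambda l: bool(l),
--                                  lambda l: l and 'variables' not in l.lower())
--     else:
--         n0 = len(lines[0].split())
--         if n0 == len(lines[1].split()) and (n0 == 2 or (n0 == 1 and len(lines[1]) != 1)):
--             # variables section comes first
--             variables, coords = _cut(lines,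
--                                      lambda l: not l or len(l.split()) != n0,
--                                      lambda l: True,
--                                      lambda l: bool(l))
--         elif len(lines[-1].split()) == len(lines[-2].split()) and len(lines[-1].split()) in (1, 2):
--             # coordinates section comes first
--             nl = len(lines[-1].split())
--             coords, variables = _cut(lines,
--                                      lambda l: not l,
--                                      lambda l: bool(l),
--                                      lambda l: l and len(l.split()) == nl)
--         else:
--             coords, variables = [], []
--     return ('\n'.join(coords) if coords else zmat_str,
--             '\n'.join(variables) if variables else None)
-- ===== Notes on version B (the rewrite author's own statement) =====
-- stated objective: alternative
-- what changed: Replaces A's three bespoke stateful flag-accumulation loops by a single recursive higher-order splitter _cut(lines, stop, keep_pre, keep_post) that structurally recurses on the line list, splitting at the first stop-line and filtering each side; each branch only supplies predicates.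
import Mathlib
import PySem

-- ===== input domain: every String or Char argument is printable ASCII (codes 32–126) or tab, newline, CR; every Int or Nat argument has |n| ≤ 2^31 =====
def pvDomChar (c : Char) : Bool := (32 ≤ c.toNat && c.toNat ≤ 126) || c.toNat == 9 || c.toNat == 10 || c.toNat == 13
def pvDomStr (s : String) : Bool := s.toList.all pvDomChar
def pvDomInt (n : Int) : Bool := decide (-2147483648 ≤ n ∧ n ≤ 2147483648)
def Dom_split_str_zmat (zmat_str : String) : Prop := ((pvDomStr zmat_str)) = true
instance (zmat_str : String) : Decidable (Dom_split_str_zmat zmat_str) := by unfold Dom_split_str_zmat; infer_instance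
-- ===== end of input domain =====

-- B replaces A's three stateful flag-accumulation loops by ONE recursive higher-order splitter (objective: alternative decomposition).

-- ===== PORT A =====
-- line truthiness: Python's `if line:` on a string
def pvNE (l : String) : Bool := PySem.Str.len l != 0
-- `'variables' in line.lower()` (shared sub-expression of both Pythons)
def pvVarLine (l : String) : Bool := PySem.Str.isIn "variables" (PySem.Str.lower l)

-- branch 1 loop body of A ('variables' occurs in the zmat)
def pvA1step (st : List String × List String × Bool) (line : String) : List String × List String × Bool :=
  if pvVarLine line then (st.1, st.2.1, true)
  else if st.2.2 && pvNE line then (st.1, st.2.1 ++ [line], st.2.2)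
  else if pvNE line then (st.1 ++ [line], st.2.1, st.2.2)
  else st

-- branch 2 loop body of A (variables section first)
def pvA2step (n0 : Nat) (st : List String × List String × Bool) (line : String) : List String × List String × Bool :=
  let c' := if st.2.2 && pvNE line then st.1 ++ [line] else st.1
  if (!st.2.2) && ((PySem.Str.split₀ line).length == n0) && pvNE line then (c', st.2.1 ++ [line], st.2.2)
  else (c', st.2.1, true)

-- branch 3 loop body of A (coordinates section first)
def pvA3step (nL : Nat) (st : List String × List String × Bool) (line : String) : List String × List String × Bool :=
  let v' := if st.2.2 && ((PySem.Str.split₀ line).length == nL) && pvNE line then st.2.1 ++ [line] else st.2.1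
  if (!st.2.2) && pvNE line then (st.1 ++ [line], v', st.2.2)
  else (st.1, v', true)

-- shared final two lines of both Pythons: '\n'.join(xs) if xs else fallback
def pvFinish (zmat_str : String) (r : List String × List String) : String × Option String :=
  (if r.1.length ≠ 0 then PySem.Str.join "\n" r.1 else zmat_str,
   if r.2.length ≠ 0 then some (PySem.Str.join "\n" r.2) else none)

def split_str_zmat (zmat_str : String) : String × Option String :=
  let res : List String × List String :=
    if pvVarLine zmat_str then
      let st := (PySem.Str.splitlines zmat_str).foldl pvA1step ([], [], false)
      (st.1, st.2.1)
    else
      let splits := PySem.Str.splitlines zmat_str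
      match PySem.List.pyGet? splits 0, PySem.List.pyGet? splits 1,
            PySem.List.pyGet? splits (-1), PySem.List.pyGet? splits (-2) with
      | some s0, some s1, some sl, some sm =>
        let n0 := (PySem.Str.split₀ s0).length
        if n0 = (PySem.Str.split₀ s1).length ∧ (n0 = 2 ∨ (n0 = 1 ∧ PySem.Str.len s1 ≠ 1)) then
          let st := splits.foldl (pvA2step n0) ([], [], false)
          (st.1, st.2.1)
        else
          let nL := (PySem.Str.split₀ sl).length
          if nL = (PySem.Str.split₀ sm).length ∧ (nL = 1 ∨ nL = 2) then
            let st := splits.foldl (pvA3step nL) ([], [], false)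
            (st.1, st.2.1)
          else ([], [])
      | _, _, _, _ => ([], [])    -- Python raises IndexError here (fewer than 2 lines); excluded by Pre_
  pvFinish zmat_str res

-- ===== PORT B =====
-- B's recursive helper `_cut`: split at the first line satisfying `stop`
-- (dropping it), filtering the two sides with `keepPre` / `keepPost`.
def pvCut (stop keepPre keepPost : String → Bool) : List String → List String × List String
  | [] => ([], [])
  | h :: t =>
    if stop h then ([], t.filter keepPost)
    else
      let r := pvCut stop keepPre keepPost t
      (if keepPre h then h :: r.1 else r.1, r.2)

def split_str_zmat_alt (zmat_str : String) : String × Option String :=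
  let lines := PySem.Str.splitlines zmat_str
  let res : List String × List String :=
    if pvVarLine zmat_str then
      pvCut pvVarLine pvNE (fun l => pvNE l && !pvVarLine l) lines
    else
      match PySem.List.pyGet? lines 0 with
      | none => ([], [])      -- Python raises IndexError here (fewer than 2 lines); excluded by Pre_
      | some s0 =>
      match PySem.List.pyGet? lines 1 with
      | none => ([], [])      -- likewise
      | some s1 =>
      match PySem.List.pyGet? lines (-1) with
      | none => ([], [])      -- likewise
      | some sl =>
      match PySem.List.pyGet? lines (-2) with
      | none => ([], [])      -- likewise
      | some sm =>
        let n0 := (PySem.Str.split₀ s0).length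
        if n0 = (PySem.Str.split₀ s1).length ∧ (n0 = 2 ∨ (n0 = 1 ∧ PySem.Str.len s1 ≠ 1)) then
          -- variables section comes first
          let r := pvCut (fun l => !pvNE l || !((PySem.Str.split₀ l).length == n0))
                         (fun _ => true) pvNE lines
          (r.2, r.1)
        else
          let nL := (PySem.Str.split₀ sl).length
          if nL = (PySem.Str.split₀ sm).length ∧ (nL = 1 ∨ nL = 2) then
            -- coordinates section comes first
            pvCut (fun l => !pvNE l) pvNE (fun l => pvNE l && ((PySem.Str.split₀ l).length == nL)) lines
          else ([], [])
  pvFinish zmat_str res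

-- ===== PRECONDITION & SPEC =====
-- Pre_ excludes exactly the inputs on which A raises IndexError: fewer than two lines without a variables marker.
def Pre_split_str_zmat (zmat_str : String) : Prop :=
  pvVarLine zmat_str = true ∨ 2 ≤ (PySem.Str.splitlines zmat_str).length
instance (zmat_str : String) : Decidable (Pre_split_str_zmat zmat_str) := by unfold Pre_split_str_zmat; infer_instance

def pvWitness_split_str_zmat : String := "C\nH 1 1.0"

def Spec_split_str_zmat (zmat_str : String) (out : String × Option String) : Prop := out = split_str_zmat_alt zmat_str
instance (zmat_str : String) (out : String × Option String) : Decidable (Spec_split_str_zmat zmat_str out) := by unfold Spec_split_str_zmat; infer_instance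

-- ===== CLAIM (what is proved, stated in full; the proofs are below) =====
def Claim_equal_split_str_zmat : Prop := ∀ (zmat_str : String), Dom_split_str_zmat zmat_str → Pre_split_str_zmat zmat_str → Spec_split_str_zmat zmat_str (split_str_zmat zmat_str)

-- ===== LEMMAS AND PROOFS =====

-- characterisation of B's recursive splitter in take/drop form
theorem pvCut_eq (stop keepPre keepPost : String → Bool) (ls : List String) :
    pvCut stop keepPre keepPost ls =
      ((ls.take (ls.findIdx stop)).filter keepPre,
       (ls.drop (ls.findIdx stop + 1)).filter keepPost) := by
  induction ls with
  | nil => simp [pvCut]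
  | cons h t ih =>
    by_cases hs : stop h
    · simp [pvCut, hs, List.findIdx_cons]
    · by_cases hk : keepPre h <;> simp [pvCut, hs, hk, List.findIdx_cons, ih]

-- every line before the first empty line is non-empty
theorem take_findIdx_filter (ls : List String) :
    (ls.take (ls.findIdx (fun l => !pvNE l))).filter pvNE
      = ls.take (ls.findIdx (fun l => !pvNE l)) := by
  induction ls with
  | nil => simp
  | cons h t ih =>
    by_cases hn : pvNE h
    · simp [List.findIdx_cons, hn, ih]
    · simp at hn
      simp [List.findIdx_cons, hn]

theorem loop1_post (ls : List String) (c v : List String) :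
    ls.foldl pvA1step (c, v, true) = (c, v ++ ls.filter (fun l => pvNE l && !pvVarLine l), true) := by
  induction ls generalizing v with
  | nil => simp
  | cons l ls ih =>
    by_cases hv : pvVarLine l <;> by_cases hn : pvNE l <;>
      simp only [List.foldl_cons, pvA1step] <;> simp [hv, hn, ih]

theorem loop1_pre (ls : List String) (c v : List String) :
    (ls.foldl pvA1step (c, v, false)).1 = c ++ (ls.take (ls.findIdx pvVarLine)).filter pvNE ∧
    (ls.foldl pvA1step (c, v, false)).2.1 = v ++ (ls.drop (ls.findIdx pvVarLine + 1)).filter (fun l => pvNE l && !pvVarLine l) := by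
  induction ls generalizing c v with
  | nil => simp
  | cons l ls ih =>
    simp only [List.foldl_cons, pvA1step]
    by_cases hv : pvVarLine l
    · simp [hv, loop1_post, List.findIdx_cons]
    · by_cases hn : pvNE l <;> simp [hv, hn, List.findIdx_cons, ih]

theorem loop2_post (n0 : Nat) (ls : List String) (c v : List String) :
    ls.foldl (pvA2step n0) (c, v, true) = (c ++ ls.filter pvNE, v, true) := by
  induction ls generalizing c with
  | nil => simp
  | cons l ls ih =>
    by_cases hn : pvNE l <;> simp [pvA2step, hn, ih]

theorem loop2_pre (n0 : Nat) (ls : List String) (c v : List String) :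
    (ls.foldl (pvA2step n0) (c, v, false)).1 = c ++ (ls.drop (ls.findIdx (fun l => !pvNE l || !((PySem.Str.split₀ l).length == n0)) + 1)).filter pvNE ∧
    (ls.foldl (pvA2step n0) (c, v, false)).2.1 = v ++ ls.take (ls.findIdx (fun l => !pvNE l || !((PySem.Str.split₀ l).length == n0))) := by
  induction ls generalizing v with
  | nil => simp
  | cons l ls ih =>
    simp only [List.foldl_cons]
    by_cases hb : (!pvNE l || !((PySem.Str.split₀ l).length == n0)) = true
    · have hc : (((PySem.Str.split₀ l).length == n0) && pvNE l) = false := by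
        simp only [Bool.or_eq_true, Bool.not_eq_true'] at hb
        rcases hb with h | h <;> simp [h]
      simp only [pvA2step, Bool.false_and, Bool.not_false, Bool.true_and, hc, if_false,
        Bool.false_eq_true]
      simp [loop2_post, List.findIdx_cons, hb]
    · have hne : pvNE l = true := by
        by_contra h
        simp only [Bool.not_eq_true] at h
        simp [h] at hb
      have hm : ((PySem.Str.split₀ l).length == n0) = true := by
        by_contra h
        simp only [Bool.not_eq_true] at h
        simp [h] at hb
      simp only [pvA2step, Bool.false_and, Bool.not_false, hne, hm, Bool.and_self,
        if_true, Bool.false_eq_true, ite_false]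
      simp [List.findIdx_cons, hb, ih]

theorem loop3_post (nL : Nat) (ls : List String) (c v : List String) :
    ls.foldl (pvA3step nL) (c, v, true) = (c, v ++ ls.filter (fun l => pvNE l && ((PySem.Str.split₀ l).length == nL)), true) := by
  induction ls generalizing v with
  | nil => simp
  | cons l ls ih =>
    by_cases hn : pvNE l <;> by_cases hm : ((PySem.Str.split₀ l).length == nL) = true <;>
      simp [pvA3step, hn, hm, ih]

theorem loop3_pre (nL : Nat) (ls : List String) (c v : List String) :
    (ls.foldl (pvA3step nL) (c, v, false)).1 = c ++ ls.take (ls.findIdx (fun l => !pvNE l)) ∧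
    (ls.foldl (pvA3step nL) (c, v, false)).2.1 = v ++ (ls.drop (ls.findIdx (fun l => !pvNE l) + 1)).filter (fun l => pvNE l && ((PySem.Str.split₀ l).length == nL)) := by
  induction ls generalizing c with
  | nil => simp
  | cons l ls ih =>
    by_cases hn : pvNE l
    · simp [pvA3step, hn, List.findIdx_cons, ih]
    · simp at hn
      simp [pvA3step, hn, List.findIdx_cons, loop3_post]

-- ===== VERDICT (by name: the statement is the Claim_ definition above) =====
theorem split_str_zmat_spec : Claim_equal_split_str_zmat := by
  intro z _ _
  unfold Spec_split_str_zmat split_str_zmat split_str_zmat_alt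
  refine congrArg (pvFinish z) ?_
  by_cases hvar : pvVarLine z = true
  · rw [if_pos hvar, if_pos hvar]
    rw [pvCut_eq]
    exact Prod.ext (loop1_pre (PySem.Str.splitlines z) [] []).1
      ((loop1_pre (PySem.Str.splitlines z) [] []).2.trans (by simp))
  · rw [if_neg hvar, if_neg hvar]
    dsimp only
    cases h0 : PySem.List.pyGet? (PySem.Str.splitlines z) 0 with
    | none => rfl
    | some s0 =>
      cases h1 : PySem.List.pyGet? (PySem.Str.splitlines z) 1 with
      | none => rfl
      | some s1 =>
        cases hl : PySem.List.pyGet? (PySem.Str.splitlines z) (-1) with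
        | none => rfl
        | some sl =>
          cases hm : PySem.List.pyGet? (PySem.Str.splitlines z) (-2) with
          | none => rfl
          | some sm =>
            dsimp only
            by_cases hc2 : (PySem.Str.split₀ s0).length = (PySem.Str.split₀ s1).length ∧
                ((PySem.Str.split₀ s0).length = 2 ∨ ((PySem.Str.split₀ s0).length = 1 ∧ PySem.Str.len s1 ≠ 1))
            · rw [if_pos hc2, if_pos hc2]
              rw [pvCut_eq]
              exact Prod.ext ((loop2_pre _ (PySem.Str.splitlines z) [] []).1.trans (by simp))
                ((loop2_pre _ (PySem.Str.splitlines z) [] []).2.trans (by simp [List.filter_true]))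
            · rw [if_neg hc2, if_neg hc2]
              by_cases hc3 : (PySem.Str.split₀ sl).length = (PySem.Str.split₀ sm).length ∧
                  ((PySem.Str.split₀ sl).length = 1 ∨ (PySem.Str.split₀ sl).length = 2)
              · rw [if_pos hc3, if_pos hc3]
                rw [pvCut_eq]
                exact Prod.ext ((loop3_pre _ (PySem.Str.splitlines z) [] []).1.trans
                    (by simp [take_findIdx_filter]))
                  ((loop3_pre _ (PySem.Str.splitlines z) [] []).2.trans (by simp))
              · rw [if_neg hc3, if_neg hc3]
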